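-- pv_equiv track=rewrite | github.com/TanGentleman/TanTan | Link_Grabber.py | display_hints
-- ===== SOURCE A (Python) =====
-- def display_hints(counts, posts):
--     for post in posts:
--         if 'post_hint' in post['data']:
--             post_hint = post['data']['post_hint']
--             if post_hint in counts:
--                 counts[post_hint] += 1
--         else:
--             counts['other'] += 1
--     return counts
-- ===== SOURCE B (Python) =====
-- def display_hints(counts, posts):
--     hints = [post['data'].get('post_hint') for post in posts]
--     for key in counts:
--         counts[key] += sum(1 for h in hints
--                            if h == key or (h is None and key == 'other'))
--     return counts
-- ===== Notes on version B (the rewrite author's own statement) =====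
-- stated objective: alternative
-- what changed: B inverts the traversal: it first extracts the list of post hints (None for hint-less posts), then loops over the keys of counts, adding to each key the number of matching hints (None hints matching only the key 'other'), instead of A's single pass over posts that updates counts per post.
import Mathlib
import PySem

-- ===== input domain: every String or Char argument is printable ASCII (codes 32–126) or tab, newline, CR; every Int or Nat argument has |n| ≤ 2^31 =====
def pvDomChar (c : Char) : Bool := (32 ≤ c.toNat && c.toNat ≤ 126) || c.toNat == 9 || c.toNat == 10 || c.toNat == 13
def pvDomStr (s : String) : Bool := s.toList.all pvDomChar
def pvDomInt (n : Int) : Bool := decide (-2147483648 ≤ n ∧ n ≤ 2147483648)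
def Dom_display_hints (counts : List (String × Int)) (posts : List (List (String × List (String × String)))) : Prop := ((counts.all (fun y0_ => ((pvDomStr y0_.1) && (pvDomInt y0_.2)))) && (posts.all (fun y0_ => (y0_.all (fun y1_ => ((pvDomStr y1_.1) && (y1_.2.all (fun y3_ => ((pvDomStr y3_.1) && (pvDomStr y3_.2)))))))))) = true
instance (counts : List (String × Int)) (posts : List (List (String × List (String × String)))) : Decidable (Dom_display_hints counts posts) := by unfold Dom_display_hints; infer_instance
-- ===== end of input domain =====

-- B inverts the traversal (extract the hint of every post once, then tally per counts key); both
-- Pythons mutate `counts` in place, the equivalence proved here is about the returned value.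

-- ===== PORT A =====
-- one loop iteration of A: 'post_hint' in post['data'] / counts[post_hint] += 1 / counts['other'] += 1
-- (post['data'] raising KeyError, and counts['other'] += 1 raising KeyError, are the `none`/not-contains
--  cases; those inputs are excluded by Pre_ below, the port leaves the dict unchanged there)
def stepA (d : PySem.Dict String Int) (post : List (String × List (String × String))) : PySem.Dict String Int :=
  match (PySem.Dict.mk post).get? "data" with
  | none => d            -- KeyError 'data' in Python; outside Pre_
  | some data =>
    match (PySem.Dict.mk data).get? "post_hint" with
    | some h => if d.contains h then d.modify h 0 (· + 1) else d
    | none => d.modify "other" 0 (· + 1)   -- KeyError in Python when 'other' absent; outside Pre_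

def display_hints (counts : List (String × Int)) (posts : List (List (String × List (String × String)))) : List (String × Int) :=
  (posts.foldl stepA (PySem.Dict.mk counts)).items

-- ===== PORT B =====
-- post['data'].get('post_hint') : None (= none) when the post has no hint
-- (a missing 'data' key is a KeyError in Python, outside Pre_; the port yields none there)
def hintOf (post : List (String × List (String × String))) : Option String :=
  match (PySem.Dict.mk post).get? "data" with
  | none => none
  | some data => (PySem.Dict.mk data).get? "post_hint"

-- sum(1 for h in hints if h == key or (h is None and key == 'other'))
def cntFor (hints : List (Option String)) (key : String) : Int :=
  ((hints.countP (fun h => h == some key || (h == none && key == "other"))) : Int)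

def display_hints_alt (counts : List (String × Int)) (posts : List (List (String × List (String × String)))) : List (String × Int) :=
  let hints := posts.map hintOf
  let d0 := PySem.Dict.mk counts
  (d0.keys.foldl (fun d key => d.modify key 0 (· + cntFor hints key)) d0).items

-- ===== PRECONDITION & SPEC =====
-- post has a 'data' key (else both Pythons raise KeyError)
def hasData (post : List (String × List (String × String))) : Bool :=
  (PySem.Dict.mk post).contains "data"
-- post has a 'data' dict but no 'post_hint' in it (the branch that does counts['other'] += 1)
def hintless (post : List (String × List (String × String))) : Bool :=
  match (PySem.Dict.mk post).get? "data" with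
  | some data => !(PySem.Dict.mk data).contains "post_hint"
  | none => false

-- Pre_ excludes (a) the inputs where Python A raises KeyError — a post without a 'data' key, or a
-- hint-less post while counts has no 'other' key — and (b) counts lists with duplicate keys, which
-- are not the encoding of any Python dict (a dict's keys are unique).
def Pre_display_hints (counts : List (String × Int)) (posts : List (List (String × List (String × String)))) : Prop :=
  (counts.map (·.1)).Nodup ∧
  (∀ post ∈ posts, hasData post = true) ∧
  (posts.any hintless = true → (PySem.Dict.mk counts).contains "other" = true)
instance (counts : List (String × Int)) (posts : List (List (String × List (String × String)))) : Decidable (Pre_display_hints counts posts) := by unfold Pre_display_hints; infer_instance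

def pvWitness_display_hints : (List (String × Int)) × (List (List (String × List (String × String)))) :=
  ([("image", 2), ("other", 0)],
   [[("data", [("post_hint", "image")])], [("data", [("title", "x")])], [("data", [("post_hint", "link")])]])

def Spec_display_hints (counts : List (String × Int)) (posts : List (List (String × List (String × String)))) (out : List (String × Int)) : Prop := out = display_hints_alt counts posts
instance (counts : List (String × Int)) (posts : List (List (String × List (String × String)))) (out : List (String × Int)) : Decidable (Spec_display_hints counts posts out) := by unfold Spec_display_hints; infer_instance

-- ===== CLAIM (what is proved, stated in full; the proofs are below) =====
def Claim_equal_display_hints : Prop := ∀ (counts : List (String × Int)) (posts : List (List (String × List (String × String)))), Dom_display_hints counts posts → Pre_display_hints counts posts → Spec_display_hints counts posts (display_hints counts posts)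

-- ===== LEMMAS AND PROOFS =====

-- 'bump' is the effect of one A-iteration on the dict, abstracted over the added amount
def bump (d : PySem.Dict String Int) (k : String) (a : Int) : PySem.Dict String Int :=
  if d.contains k then d.modify k 0 (· + a) else d

def bumps (l : List (String × Int)) (d : PySem.Dict String Int) : PySem.Dict String Int :=
  l.foldl (fun d p => bump d p.1 p.2) d

-- what one post contributes, as a (key, 1) pair
def aL (post : List (String × List (String × String))) : List (String × Int) :=
  match (PySem.Dict.mk post).get? "data" with
  | none => []
  | some data =>
    match (PySem.Dict.mk data).get? "post_hint" with
    | some h => [(h, 1)]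
    | none => [("other", 1)]

def aList (posts : List (List (String × List (String × String)))) : List (String × Int) :=
  posts.flatMap aL

-- total amount a pair list adds at key k, and whether it touches k at all
def totalK (l : List (String × Int)) (k : String) : Int :=
  ((l.filter (fun p => p.1 == k)).map (·.2)).sum

def hitK (l : List (String × Int)) (k : String) : Bool :=
  l.any (fun p => p.1 == k)

theorem totalK_cons (a : String × Int) (l : List (String × Int)) (k : String) :
    totalK (a :: l) k = (if a.1 == k then a.2 else 0) + totalK l k := by
  by_cases h : (a.1 == k) = true
  · simp [totalK, h]
  · simp [totalK, h]

theorem totalK_of_not_hit {l : List (String × Int)} {k : String} (h : hitK l k = false) : totalK l k = 0 := by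
  unfold hitK at h
  unfold totalK
  rw [List.filter_eq_nil_iff.2]
  · simp
  · intro p hp
    simp only [List.any_eq_false] at h
    exact h p hp

theorem bumps_items (l : List (String × Int)) (d : PySem.Dict String Int) :
    (bumps l d).items = d.items.map (fun p => if hitK l p.1 then (p.1, d.getD p.1 0 + totalK l p.1) else p) := by
  induction l generalizing d with
  | nil => simp [bumps, hitK]
  | cons x l ih =>
    show (bumps l (bump d x.1 x.2)).items = _
    rw [ih]
    by_cases hc : d.contains x.1 = true
    · have hb : bump d x.1 x.2 = d.insert x.1 (d.getD x.1 0 + x.2) := by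
        simp [bump, hc, PySem.Dict.modify]
      rw [hb, PySem.Dict.items_insert_of_contains (h := hc), List.map_map]
      apply List.map_congr_left
      intro p hp
      simp only [Function.comp]
      by_cases h1 : p.1 = x.1
      · have hbeq : (p.1 == x.1) = true := beq_iff_eq.2 h1
        simp only [hbeq, if_pos]
        have hgd : (d.insert x.1 (d.getD x.1 0 + x.2)).getD x.1 0 = d.getD x.1 0 + x.2 :=
          PySem.Dict.getD_of_get?_eq_some _ _ (PySem.Dict.get?_insert_self _ _ _)
        have hhit : hitK (x :: l) p.1 = true := by simp [hitK, h1]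
        have htot : totalK (x :: l) p.1 = x.2 + totalK l p.1 := by
          simp [totalK, h1]
        by_cases h2 : hitK l x.1 = true
        · rw [if_pos h2, hgd, if_pos hhit, htot, h1]
          rw [add_assoc]
        · rw [if_neg (by simp [h2]), if_pos hhit, htot, h1,
            totalK_of_not_hit (by simpa using h2), add_zero]
      · have hbeq : (p.1 == x.1) = false := by simp [h1]
        simp only [hbeq, Bool.false_eq_true, if_false]
        have hgd : (bump d x.1 x.2).getD p.1 0 = d.getD p.1 0 := by
          rw [hb, PySem.Dict.getD_insert]
          simp [h1]
        have hbeq' : (x.1 == p.1) = false := by simp [Ne.symm h1]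
        have hhit : hitK (x :: l) p.1 = hitK l p.1 := by simp [hitK, hbeq']
        have htot : totalK (x :: l) p.1 = totalK l p.1 := by simp [totalK, hbeq']
        rw [← hb, hgd, hhit, htot]
    · have hb : bump d x.1 x.2 = d := by simp [bump, hc]
      rw [hb]
      apply List.map_congr_left
      intro p hp
      have h1 : p.1 ≠ x.1 := by
        intro he
        exact hc ((PySem.Dict.contains_iff_mem_keys _ _).2 (he ▸ PySem.Dict.mem_keys_of_mem_items _ hp))
      have hbeq' : (x.1 == p.1) = false := by simp [Ne.symm h1]
      have hhit : hitK (x :: l) p.1 = hitK l p.1 := by simp [hitK, hbeq']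
      have htot : totalK (x :: l) p.1 = totalK l p.1 := by simp [totalK, hbeq']
      rw [hhit, htot]

theorem contains_bumps (l : List (String × Int)) (d : PySem.Dict String Int) (k : String) :
    (bumps l d).contains k = d.contains k := by
  induction l generalizing d with
  | nil => rfl
  | cons x l ih =>
    show (bumps l (bump d x.1 x.2)).contains k = _
    rw [ih]
    unfold bump
    split_ifs with h
    · rw [PySem.Dict.contains_modify]
      by_cases hk : (k == x.1) = true
      · rw [hk, Bool.true_or, (beq_iff_eq).1 hk, h]
      · simp [hk]
    · rfl

theorem stepA_eq_bumps_aL (d : PySem.Dict String Int) (post : List (String × List (String × String)))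
    (H : hintless post = true → d.contains "other" = true) :
    stepA d post = bumps (aL post) d := by
  unfold stepA aL hintless at *
  cases hd : (PySem.Dict.mk post).get? "data" with
  | none => simp [bumps]
  | some data =>
    cases hh : (PySem.Dict.mk data).get? "post_hint" with
    | some h => simp [hh, bumps, bump]
    | none =>
      simp only [hd, hh] at H ⊢
      have hc : d.contains "other" = true := H (by simp [PySem.Dict.contains_eq_isSome_get?, hh])
      simp [bumps, bump, hc]

theorem foldl_stepA_eq_bumps (posts : List (List (String × List (String × String)))) (d : PySem.Dict String Int)
    (H : d.contains "other" = true ∨ posts.all (fun p => !hintless p) = true) :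
    posts.foldl stepA d = bumps (aList posts) d := by
  induction posts generalizing d with
  | nil => rfl
  | cons p ps ih =>
    have h1 : stepA d p = bumps (aL p) d := by
      apply stepA_eq_bumps_aL
      intro hl
      rcases H with H | H
      · exact H
      · simp [List.all_cons, hl] at H
    rw [List.foldl_cons, h1, show aList (p :: ps) = aL p ++ aList ps from rfl]
    rw [show bumps (aL p ++ aList ps) d = bumps (aList ps) (bumps (aL p) d) by simp [bumps, List.foldl_append]]
    apply ih
    rcases H with H | H
    · exact Or.inl ((contains_bumps _ _ _).trans H)
    · refine Or.inr ?_
      simp only [List.all_cons, Bool.and_eq_true] at H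
      simp [H.2]

-- B's per-key tally equals the total the per-post contribution list adds at that key
theorem cnt_eq_totalK (posts : List (List (String × List (String × String))))
    (hall : ∀ post ∈ posts, hasData post = true) (k : String) :
    cntFor (posts.map hintOf) k = totalK (aList posts) k := by
  induction posts with
  | nil => simp [cntFor, aList, totalK]
  | cons p ps ih =>
    have hall' : ∀ post ∈ ps, hasData post = true := fun q hq => hall q (List.mem_cons_of_mem _ hq)
    have hstep : cntFor (hintOf p :: ps.map hintOf) k =
        (if (hintOf p == some k || (hintOf p == none && k == "other")) then 1 else 0) + cntFor (ps.map hintOf) k := by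
      simp [cntFor, List.countP_cons]
      split_ifs <;> omega
    rw [List.map_cons, hstep,
      show aList (p :: ps) = aL p ++ aList ps from rfl]
    cases hd : (PySem.Dict.mk p).get? "data" with
    | none =>
      exact absurd (hall p (List.mem_cons_self)) (by simp [hasData, PySem.Dict.contains_eq_isSome_get?, hd])
    | some data =>
      cases hh : (PySem.Dict.mk data).get? "post_hint" with
      | some h =>
        have h1 : hintOf p = some h := by simp [hintOf, hd, hh]
        have h2 : aL p = [(h, 1)] := by simp [aL, hd, hh]
        rw [h1, h2, List.singleton_append, totalK_cons, ih hall']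
        by_cases hk : (h == k) = true
        · simp [hk]
        · simp [hk]
      | none =>
        have h1 : hintOf p = none := by simp [hintOf, hd, hh]
        have h2 : aL p = [("other", 1)] := by simp [aL, hd, hh]
        rw [h1, h2, List.singleton_append, totalK_cons, ih hall']
        by_cases hk : (k == "other") = true
        · have : ("other" == k) = true := by rw [beq_iff_eq] at hk ⊢; exact hk.symm
          simp [hk, this]
        · have hko : k ≠ "other" := by simpa using hk
          have h3 : ("other" == k) = false := beq_eq_false_iff_ne.2 (Ne.symm hko)
          have h4 : (k == "other") = false := beq_eq_false_iff_ne.2 hko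
          simp [h3, h4]

-- B's fold over the keys is 'bumps' of the key→tally pair list (every key is present throughout)
theorem foldl_modify_eq_bumps (ks : List String) (c : String → Int) (d : PySem.Dict String Int)
    (h : ∀ k ∈ ks, d.contains k = true) :
    ks.foldl (fun d key => d.modify key 0 (· + c key)) d = bumps (ks.map (fun k => (k, c k))) d := by
  induction ks generalizing d with
  | nil => rfl
  | cons k ks ih =>
    have hc : d.contains k = true := h k List.mem_cons_self
    rw [List.map_cons, List.foldl_cons,
      show bumps ((k, c k) :: ks.map (fun k => (k, c k))) d
        = bumps (ks.map (fun k => (k, c k))) (bump d k (c k)) from rfl,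
      show bump d k (c k) = d.modify k 0 (· + c k) by simp [bump, hc]]
    apply ih
    intro k' hk'
    rw [PySem.Dict.contains_modify]
    rw [h k' (List.mem_cons_of_mem _ hk')]
    simp

theorem hitK_map_keys (ks : List String) (c : String → Int) (k : String) (hm : k ∈ ks) :
    hitK (ks.map (fun k' => (k', c k'))) k = true := by
  rw [hitK, List.any_map, List.any_eq_true]
  exact ⟨k, hm, by simp⟩

theorem totalK_map_keys (ks : List String) (c : String → Int) (k : String)
    (hnd : ks.Nodup) (hm : k ∈ ks) :
    totalK (ks.map (fun k' => (k', c k'))) k = c k := by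
  induction ks with
  | nil => cases hm
  | cons a ks ih =>
    rw [List.map_cons, totalK_cons]
    rcases List.mem_cons.1 hm with he | hm'
    · have hkn : k ∉ ks := he ▸ (List.nodup_cons.1 hnd).1
      have hz : totalK (ks.map (fun k' => (k', c k'))) k = 0 := by
        apply totalK_of_not_hit
        rw [hitK, List.any_map, List.any_eq_false]
        intro b hb
        have : b ≠ k := fun e => hkn (e ▸ hb)
        simp [Function.comp, this]
      rw [← he] at *
      simp [hz]
    · have hne : (a == k) = false :=
        beq_eq_false_iff_ne.2 (fun e => (List.nodup_cons.1 hnd).1 (e ▸ hm'))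
      rw [ih (List.nodup_cons.1 hnd).2 hm', hne]
      simp

-- core: B's key→tally pair list and A's per-post contribution list bump D to the same items
theorem b_bumps_eq_a_bumps (counts : List (String × Int)) (posts : List (List (String × List (String × String))))
    (hnd : (PySem.Dict.mk counts).keys.Nodup)
    (hall : ∀ post ∈ posts, hasData post = true) :
    (bumps ((PySem.Dict.mk counts).keys.map (fun k => (k, cntFor (posts.map hintOf) k))) (PySem.Dict.mk counts)).items
      = (bumps (aList posts) (PySem.Dict.mk counts)).items := by
  set D := PySem.Dict.mk counts with hD
  rw [bumps_items, bumps_items]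
  apply List.map_congr_left
  intro p hp
  have hpk : p.1 ∈ D.keys := PySem.Dict.mem_keys_of_mem_items _ hp
  rw [hitK_map_keys _ _ _ hpk, if_pos rfl,
    totalK_map_keys _ _ _ hnd hpk, cnt_eq_totalK posts hall p.1]
  by_cases hh : hitK (aList posts) p.1 = true
  · rw [if_pos hh]
  · rw [if_neg hh, totalK_of_not_hit (Bool.eq_false_iff.2 hh), add_zero,
      PySem.Dict.getD_of_mem_items _ (k := p.1) (v := p.2) (by simpa using hp) hnd]

theorem a_eq_b (counts : List (String × Int)) (posts : List (List (String × List (String × String))))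
    (hpre : Pre_display_hints counts posts) :
    display_hints counts posts = display_hints_alt counts posts := by
  obtain ⟨hnd, hall, hother⟩ := hpre
  have hnd' : (PySem.Dict.mk counts).keys.Nodup := hnd
  have H : (PySem.Dict.mk counts).contains "other" = true ∨ posts.all (fun p => !hintless p) = true := by
    by_cases ha : posts.any hintless = true
    · exact Or.inl (hother ha)
    · right
      rw [List.all_eq_true]
      intro p hp
      have := List.any_eq_false.1 (Bool.eq_false_iff.2 ha) p hp
      simp [this]
  rw [display_hints, foldl_stepA_eq_bumps posts _ H, display_hints_alt]
  rw [show ((posts.map hintOf) : List (Option String)) = posts.map hintOf from rfl]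
  rw [foldl_modify_eq_bumps _ _ _ (fun k hk => (PySem.Dict.contains_iff_mem_keys _ _).2 hk)]
  exact (b_bumps_eq_a_bumps counts posts hnd' hall).symm

-- ===== VERDICT (by name: the statement is the Claim_ definition above) =====
theorem display_hints_spec : Claim_equal_display_hints := by
  intro counts posts _ hpre
  exact a_eq_b counts posts hpre
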